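-- pv_equiv track=rewrite | github.com/souza-marcos/CP | unicampselection2024/gpt.py | extended_gcd_n
-- ===== SOURCE A (Python) =====
-- def extended_gcd(a: int, b: int) -> tuple[int,int,int]:
--     """
--     Return (x, y, d) such that x*a + y*b = d = gcd(a, b).
--     """
--     if b == 0:
--         return (1, 0, a)
--     x1, y1, d = extended_gcd(b, a % b)
--     # x1·b + y1·(a mod b) = d
--     # but a mod b = a - (a//b)*b
--     return (y1, x1 - (a//b)*y1, d)
--
-- def extended_gcd_n(coffs: list[int]) -> tuple[list[int], int]:
--     """
--     Given a list of integers [a1, a2, ..., an],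
--     returns (coeffs, g) where
--       coeffs = [x1, x2, ..., xn]
--       g = gcd(a1,...,an)
--     and sum(xi*ai) == g.
--     """
--     n = len(coffs)
--     # start with g = a1 and coeffs = [1,0,0,...]
--     g = coffs[0]
--     vars = [1] + [0]*(n-1)
--
--     for i in range(1, n):
--         u, v, d = extended_gcd(g, coffs[i])
--         # scale old coefficients by u
--         for j in range(i):
--             vars[j] *= u
--         vars[i] = v
--         g = d
--
--     return vars, g
-- ===== SOURCE B (Python) =====
-- def extended_gcd(a: int, b: int) -> tuple[int, int, int]:
--     """Return (x, y, d) with x*a + y*b = d = gcd(a, b)."""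
--     if b == 0:
--         return (1, 0, a)
--     x1, y1, d = extended_gcd(b, a % b)
--     return (y1, x1 - (a // b) * y1, d)
--
-- def extended_gcd_n(coffs: list[int]) -> tuple[list[int], int]:
--     # Forward pass: collect the (u, v) pair of each pairwise step (O(n) egcds),
--     # then build the coefficients back-to-front with a running suffix product
--     # of the u's (O(n) multiplications instead of A's O(n^2) rescaling).
--     g = coffs[0]
--     uvs = []
--     for a in coffs[1:]:
--         u, v, g = extended_gcd(g, a)
--         uvs.append((u, v))
--     coeffs = []
--     suf = 1
--     for u, v in reversed(uvs):
--         coeffs.append(v * suf)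
--         suf *= u
--     coeffs.append(suf)
--     coeffs.reverse()
--     return coeffs, g
-- ===== Notes on version B (the rewrite author's own statement) =====
-- stated objective: faster
-- what changed: Instead of rescaling all earlier coefficients at every step (quadratic number of multiplications), B does one forward pass collecting the (u,v) pair of each pairwise egcd and then builds the coefficients back-to-front with a running suffix product of the u's, O(n) multiplications.
import Mathlib
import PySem

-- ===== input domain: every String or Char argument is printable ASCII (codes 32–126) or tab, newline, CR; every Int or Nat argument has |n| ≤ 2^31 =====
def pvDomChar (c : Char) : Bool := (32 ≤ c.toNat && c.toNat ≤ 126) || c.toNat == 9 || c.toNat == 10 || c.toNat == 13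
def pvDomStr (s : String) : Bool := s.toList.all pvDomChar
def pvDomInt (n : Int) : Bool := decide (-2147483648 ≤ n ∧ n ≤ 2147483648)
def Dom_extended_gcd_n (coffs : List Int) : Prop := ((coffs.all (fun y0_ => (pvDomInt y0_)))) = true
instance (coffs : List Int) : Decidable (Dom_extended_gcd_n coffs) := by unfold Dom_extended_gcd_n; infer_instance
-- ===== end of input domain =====

-- B replaces A's quadratic per-step rescaling of all earlier coefficients by one forward
-- pass collecting each pairwise-egcd (u,v) pair and one backward pass with a running
-- suffix product of the u's (objective: faster).

-- termination measure for the recursive extended_gcd helper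
theorem pvEgcdDec (a b : Int) (hb : ¬ b = 0) : (PySem.Int.mod a b).natAbs < b.natAbs := by
  rcases lt_or_gt_of_ne hb with h | h
  · have := PySem.Int.mod_neg_bounds a h
    omega
  · have h1 := PySem.Int.mod_nonneg a h
    have h2 := PySem.Int.mod_lt a h
    omega

-- ===== PORT A =====
-- helper extended_gcd, shared by both modules (A and Source B define it identically)
def pyEgcd (a b : Int) : Int × Int × Int :=
  if b = 0 then (1, 0, a)
  else
    let r := pyEgcd b (PySem.Int.mod a b)
    (r.2.1, r.1 - PySem.Int.floordiv a b * r.2.1, r.2.2)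
termination_by b.natAbs
decreasing_by exact pvEgcdDec a b (by assumption)

def extended_gcd_n (coffs : List Int) : List Int × Int :=
  let n : Int := coffs.length
  let g := PySem.List.pyGetD coffs 0 0
  let vars : List Int := [1] ++ List.replicate (n - 1).toNat 0
  let st := (PySem.List.pyRange 1 n 1).foldl (fun (st : List Int × Int) i =>
      let r := pyEgcd st.2 (PySem.List.pyGetD coffs i 0)
      let vars1 := (PySem.List.pyRange 0 i 1).foldl (fun vars j =>
          PySem.List.pySetD vars j (PySem.List.pyGetD vars j 0 * r.1)) st.1
      (PySem.List.pySetD vars1 i r.2.1, r.2.2)) (vars, g)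
  st

-- ===== PORT B =====
def extended_gcd_n_alt (coffs : List Int) : List Int × Int :=
  let g := PySem.List.pyGetD coffs 0 0
  let fwd := (PySem.List.slice coffs (some 1) none).foldl
      (fun (st : List (Int × Int) × Int) a =>
        let r := pyEgcd st.2 a
        (st.1 ++ [(r.1, r.2.1)], r.2.2)) ([], g)
  let bwd := fwd.1.reverse.foldl
      (fun (st : List Int × Int) uv => (st.1 ++ [uv.2 * st.2], st.2 * uv.1)) ([], 1)
  (((bwd.1 ++ [bwd.2]).reverse), fwd.2)

-- ===== PRECONDITION & SPEC =====
-- Pre_ excludes only the empty list, on which A (and B alike) raises IndexError when reading the first element.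
def Pre_extended_gcd_n (coffs : List Int) : Prop := coffs ≠ []
instance (coffs : List Int) : Decidable (Pre_extended_gcd_n coffs) := by unfold Pre_extended_gcd_n; infer_instance
def pvWitness_extended_gcd_n : List Int := [6, 10, 15]

def Spec_extended_gcd_n (coffs : List Int) (out : List Int × Int) : Prop := out = extended_gcd_n_alt coffs
instance (coffs : List Int) (out : List Int × Int) : Decidable (Spec_extended_gcd_n coffs out) := by unfold Spec_extended_gcd_n; infer_instance

-- ===== CLAIM (what is proved, stated in full; the proofs are below) =====
def Claim_equal_extended_gcd_n : Prop := ∀ (coffs : List Int), Dom_extended_gcd_n coffs → Pre_extended_gcd_n coffs → Spec_extended_gcd_n coffs (extended_gcd_n coffs)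

-- ===== LEMMAS AND PROOFS =====

-- common specification: specF g as = (c0, cs, g') where c0 is the coefficient of g,
-- cs the coefficients of as and g' = gcd(g, as), per the pairwise-egcd chain
def specF (g : Int) (as : List Int) : Int × List Int × Int :=
  match as with
  | [] => (1, [], g)
  | a :: rest =>
    let r := pyEgcd g a
    let s := specF r.2.2 rest
    (r.1 * s.1, r.2.1 * s.1 :: s.2.1, s.2.2)

-- A's inner loop multiplies exactly the first `done.length` entries by u
theorem innerMul (u : Int) : ∀ (done pre rest : List Int) (aI bI : Int),
    aI = (pre.length : Int) → bI = (pre.length : Int) + (done.length : Int) →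
    (PySem.List.pyRange aI bI 1).foldl
      (fun vars j => PySem.List.pySetD vars j (PySem.List.pyGetD vars j 0 * u))
      (pre ++ done ++ rest)
    = pre ++ done.map (· * u) ++ rest := by
  intro done
  induction done with
  | nil =>
    intro pre rest aI bI ha hb
    subst ha; subst hb
    simp [PySem.List.pyRange_one_eq_nil]
  | cons d t ih =>
    intro pre rest aI bI ha hb
    subst ha; subst hb
    rw [PySem.List.pyRange_one_cons (by simp only [List.length_cons]; omega)]
    simp only [List.foldl_cons]
    have hget : PySem.List.pyGetD (pre ++ d :: t ++ rest) (pre.length : Int) 0 = d := by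
      rw [PySem.List.pyGetD_natCast]
      simp [List.getD_eq_getElem?_getD, List.append_assoc]
    have hset : PySem.List.pySetD (pre ++ d :: t ++ rest) (pre.length : Int) (d * u)
        = (pre ++ [d * u]) ++ t ++ rest := by
      simp only [PySem.List.pySetD_natCast]
      simp [List.append_assoc]
    rw [hget, hset]
    rw [ih (pre ++ [d * u]) rest _ _ (by simp) (by simp; ring)]
    simp

-- A's outer loop computes specF
theorem outerA (coffs : List Int) : ∀ (rem done : List Int) (g : Int) (aI : Int),
    aI = (done.length : Int) →
    1 ≤ done.length →
    coffs.drop done.length = rem →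
    done.length + rem.length = coffs.length →
    (PySem.List.pyRange aI (coffs.length : Int) 1).foldl
      (fun (st : List Int × Int) i =>
        let r := pyEgcd st.2 (PySem.List.pyGetD coffs i 0)
        let vars1 := (PySem.List.pyRange 0 i 1).foldl (fun vars j =>
            PySem.List.pySetD vars j (PySem.List.pyGetD vars j 0 * r.1)) st.1
        (PySem.List.pySetD vars1 i r.2.1, r.2.2))
      (done ++ List.replicate rem.length 0, g)
    = (done.map (· * (specF g rem).1) ++ (specF g rem).2.1, (specF g rem).2.2) := by
  intro rem
  induction rem with
  | nil =>
    intro done g aI ha h1 hdrop hlen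
    subst ha
    rw [PySem.List.pyRange_one_eq_nil (by simp only [List.length_nil] at hlen; omega)]
    simp [specF]
  | cons a rest ih =>
    intro done g aI ha h1 hdrop hlen
    subst ha
    have hlt : (done.length : Int) < (coffs.length : Int) := by
      simp only [List.length_cons] at hlen; omega
    rw [PySem.List.pyRange_one_cons hlt]
    simp only [List.foldl_cons]
    have hgeta : PySem.List.pyGetD coffs (done.length : Int) 0 = a := by
      rw [PySem.List.pyGetD_natCast]
      have : coffs[done.length]? = some a := by
        have h0 : (coffs.drop done.length)[0]? = some a := by rw [hdrop]; rfl
        rw [List.getElem?_drop] at h0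
        simpa using h0
      simp [List.getD_eq_getElem?_getD, this]
    rw [hgeta]
    have hinner := innerMul (pyEgcd g a).1 done ([] : List Int)
        (List.replicate (a :: rest).length 0) 0 ((done.length : Int)) (by simp) (by simp)
    simp only [List.nil_append] at hinner
    rw [hinner]
    have hset : PySem.List.pySetD
        (done.map (· * (pyEgcd g a).1) ++ List.replicate (a :: rest).length 0)
        ((done.length : Int)) (pyEgcd g a).2.1
        = (done.map (· * (pyEgcd g a).1) ++ [(pyEgcd g a).2.1]) ++ List.replicate rest.length 0 := by
      rw [show ((done.length : Int)) = ((done.map (· * (pyEgcd g a).1)).length : Int) by simp]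
      simp only [PySem.List.pySetD_natCast]
      simp [List.replicate_succ]
    rw [hset]
    have ihs := ih (done.map (· * (pyEgcd g a).1) ++ [(pyEgcd g a).2.1]) (pyEgcd g a).2.2
        ((done.length : Int) + 1) (by simp) (by simp)
        (by
          have h2 : coffs.drop (done.length + 1) = rest := by
            rw [← List.drop_drop, hdrop]; simp
          simpa using h2)
        (by simp at hlen ⊢; omega)
    rw [ihs]
    simp only [specF]
    simp [List.map_map, List.append_assoc]

-- B's forward pass as a recursion
def collect (g : Int) (as : List Int) : List (Int × Int) × Int :=
  match as with
  | [] => ([], g)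
  | a :: rest =>
    let r := pyEgcd g a
    let s := collect r.2.2 rest
    ((r.1, r.2.1) :: s.1, s.2)

theorem fwd_eq_collect : ∀ (as : List Int) (acc : List (Int × Int)) (g : Int),
    as.foldl (fun (st : List (Int × Int) × Int) a =>
        let r := pyEgcd st.2 a
        (st.1 ++ [(r.1, r.2.1)], r.2.2)) (acc, g)
    = (acc ++ (collect g as).1, (collect g as).2) := by
  intro as
  induction as with
  | nil => simp [collect]
  | cons a rest ih => intro acc g; simp [collect, ih]

-- B's backward pass builds specF's coefficients reversed
def build (uvs : List (Int × Int)) : Int × List Int :=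
  match uvs with
  | [] => (1, [])
  | (u, v) :: t =>
    let s := build t
    (u * s.1, v * s.1 :: s.2)

theorem bwd_eq_build : ∀ (uvs : List (Int × Int)),
    uvs.reverse.foldl (fun (st : List Int × Int) uv => (st.1 ++ [uv.2 * st.2], st.2 * uv.1)) ([], 1)
    = ((build uvs).2.reverse, (build uvs).1) := by
  intro uvs
  induction uvs with
  | nil => simp [build]
  | cons uv t ih =>
    obtain ⟨u, v⟩ := uv
    simp only [List.reverse_cons, List.foldl_append, ih, List.foldl_cons, List.foldl_nil, build]
    simp [mul_comm]

theorem build_collect_spec : ∀ (as : List Int) (g : Int),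
    ((build (collect g as).1).1, (build (collect g as).1).2, (collect g as).2) = specF g as := by
  intro as
  induction as with
  | nil => intro g; simp [collect, build, specF]
  | cons a rest ih => intro g; simp [collect, build, specF, ← ih]

theorem extended_gcd_n_eq_spec (c0 : Int) (as : List Int) :
    extended_gcd_n (c0 :: as) = ((specF c0 as).1 :: (specF c0 as).2.1, (specF c0 as).2.2) := by
  simp only [extended_gcd_n]
  have hg : PySem.List.pyGetD (c0 :: as) 0 0 = c0 := by
    simp [PySem.List.pyGetD, PySem.List.pyGet?, PySem.List.pyIdx?]
  have hrep : (((c0 :: as).length : Int) - 1).toNat = as.length := by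
    simp
  rw [hg, hrep]
  have := outerA (c0 :: as) as [1] c0 1 (by simp) (by simp) (by simp) (by simp [Nat.add_comm])
  simp only [List.length_cons] at this ⊢
  rw [this]
  simp

theorem extended_gcd_n_alt_eq_spec (c0 : Int) (as : List Int) :
    extended_gcd_n_alt (c0 :: as) = ((specF c0 as).1 :: (specF c0 as).2.1, (specF c0 as).2.2) := by
  simp only [extended_gcd_n_alt]
  have hg : PySem.List.pyGetD (c0 :: as) 0 0 = c0 := by
    simp [PySem.List.pyGetD, PySem.List.pyGet?, PySem.List.pyIdx?]
  rw [hg, PySem.List.slice_from_one]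
  simp only [List.tail_cons]
  rw [fwd_eq_collect, ← build_collect_spec as c0]
  simp only [List.nil_append]
  rw [bwd_eq_build]
  simp

-- ===== VERDICT (by name: the statement is the Claim_ definition above) =====
theorem extended_gcd_n_spec : Claim_equal_extended_gcd_n := by
  intro coffs _ hpre
  match coffs, hpre with
  | c0 :: as, _ =>
    show extended_gcd_n (c0 :: as) = extended_gcd_n_alt (c0 :: as)
    rw [extended_gcd_n_eq_spec, extended_gcd_n_alt_eq_spec]
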